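-- pv_equiv track=rewrite | github.com/madhuedipelli/AlgorithmsCormenTH | recursion/middleElementStack.py | utilMiddle
-- ===== SOURCE A (Python) =====
-- def utilMiddle(arr,k):
--     if k == 1:
--         arr.pop()
--         return arr
--     temp = arr.pop()
--     arr=utilMiddle(arr,k-1)
--     arr.append(temp)
--     return arr
-- ===== SOURCE B (Python) =====
-- def utilMiddle(arr, k):
--     temp = []
--     for _ in range(k - 1):
--         temp.append(arr.pop())
--     arr.pop()
--     while temp:
--         arr.append(temp.pop())
--     return arr
-- ===== Notes on version B (the rewrite author's own statement) =====
-- stated objective: alternative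
-- what changed: Replaces the recursion (pop, recurse with k-1, append back) by an iterative two-loop version with an explicit auxiliary stack: pop k-1 elements onto temp, discard one, push temp back.
import Mathlib
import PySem

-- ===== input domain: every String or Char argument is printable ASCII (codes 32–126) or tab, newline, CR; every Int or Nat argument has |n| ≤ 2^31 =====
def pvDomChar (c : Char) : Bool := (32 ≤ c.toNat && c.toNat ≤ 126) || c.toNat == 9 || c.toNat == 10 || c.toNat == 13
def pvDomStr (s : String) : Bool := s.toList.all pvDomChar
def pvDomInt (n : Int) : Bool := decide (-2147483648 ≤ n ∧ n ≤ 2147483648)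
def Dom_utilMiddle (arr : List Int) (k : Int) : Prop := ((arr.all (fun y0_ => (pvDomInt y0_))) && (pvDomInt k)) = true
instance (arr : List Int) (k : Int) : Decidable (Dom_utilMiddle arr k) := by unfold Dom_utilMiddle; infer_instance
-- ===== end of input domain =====

-- B replaces A's recursion with an iterative explicit-stack version (pop k-1 onto temp,
-- discard one, push temp back); equivalence is about the return value (both also mutate
-- arr in place, identically on Pre_). Objective: alternative decomposition, same cost.

-- ===== PORT A =====
def utilMiddle (arr : List Int) (k : Int) : List Int :=
  if k = 1 then
    match PySem.List.pop? arr with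
    | none => []                       -- arr.pop() raises IndexError (excluded by Pre_)
    | some (_, rest) => rest
  else
    match h : PySem.List.pop? arr with
    | none => []                       -- arr.pop() raises IndexError (excluded by Pre_)
    | some (temp, rest) => utilMiddle rest (k - 1) ++ [temp]
termination_by arr.length
decreasing_by
  have := PySem.List.length_of_pop?_eq_some arr h
  simp_all; omega

-- ===== PORT B =====
-- the 'for _ in range(k - 1): temp.append(arr.pop())' loop
def pvPopPhase : List Int → List Int → Nat → List Int × List Int
  | arr, temp, 0 => (arr, temp)
  | arr, temp, n + 1 =>
    match h : PySem.List.pop? arr with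
    | none => ([], temp)               -- arr.pop() raises IndexError (excluded by Pre_)
    | some (x, rest) => pvPopPhase rest (temp ++ [x]) n

-- the 'while temp: arr.append(temp.pop())' loop
def pvPushPhase (arr temp : List Int) : List Int :=
  match h : PySem.List.pop? temp with
  | none => arr
  | some (x, rest) => pvPushPhase (arr ++ [x]) rest
termination_by temp.length
decreasing_by
  have := PySem.List.length_of_pop?_eq_some temp h
  simp_all; omega

def utilMiddle_alt (arr : List Int) (k : Int) : List Int :=
  match pvPopPhase arr [] (k - 1).toNat with
  | (arr1, temp) =>
    match PySem.List.pop? arr1 with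
    | none => []                       -- arr.pop() raises IndexError (excluded by Pre_)
    | some (_, arr2) => pvPushPhase arr2 temp

-- ===== PRECONDITION & SPEC =====
-- Pre_ is exactly where Python A returns: 1 ≤ k ≤ len(arr); otherwise A raises IndexError.
def Pre_utilMiddle (arr : List Int) (k : Int) : Prop := 1 ≤ k ∧ k ≤ (arr.length : Int)
instance (arr : List Int) (k : Int) : Decidable (Pre_utilMiddle arr k) := by
  unfold Pre_utilMiddle; infer_instance
def pvWitness_utilMiddle : List Int × Int := ([3, 1, 2], 2)

def Spec_utilMiddle (arr : List Int) (k : Int) (out : List Int) : Prop := out = utilMiddle_alt arr k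
instance (arr : List Int) (k : Int) (out : List Int) : Decidable (Spec_utilMiddle arr k out) := by unfold Spec_utilMiddle; infer_instance

-- ===== CLAIM (what is proved, stated in full; the proofs are below) =====
def Claim_equal_utilMiddle : Prop := ∀ (arr : List Int) (k : Int), Dom_utilMiddle arr k → Pre_utilMiddle arr k → Spec_utilMiddle arr k (utilMiddle arr k)

-- ===== LEMMAS AND PROOFS =====

-- A removes the element k from the top (top = end of list)
theorem utilMiddle_closed (n : Nat) :
    ∀ (arr : List Int), 0 < n → n ≤ arr.length →
      utilMiddle arr (n : Int) = arr.eraseIdx (arr.length - n) := by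
  induction n with
  | zero => intro arr h; omega
  | succ m ih =>
    intro arr _ hlen
    rcases List.eq_nil_or_concat arr with rfl | ⟨ys, x, rfl⟩
    · simp at hlen
    · simp only [List.concat_eq_append] at hlen ⊢
      by_cases hm : m = 0
      · subst hm
        rw [utilMiddle]
        rw [if_pos (by norm_num), PySem.List.pop?_last]
        show ys = (ys ++ [x]).eraseIdx ((ys ++ [x]).length - 1)
        simp only [List.length_append, List.length_cons, List.length_nil,
          Nat.add_sub_cancel]
        rw [List.eraseIdx_append_of_length_le (by omega)]
        simp
      · have hne : ((m + 1 : Nat) : Int) ≠ 1 := by omega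
        rw [utilMiddle, if_neg hne, PySem.List.pop?_last]
        show utilMiddle ys (((m + 1 : Nat) : Int) - 1) ++ [x] =
          (ys ++ [x]).eraseIdx ((ys ++ [x]).length - (m + 1))
        have hcast : ((m + 1 : Nat) : Int) - 1 = (m : Int) := by omega
        rw [hcast]
        have hmlen : m ≤ ys.length := by simp at hlen; omega
        rw [ih ys (by omega) hmlen]
        have hidx : (ys ++ [x]).length - (m + 1) = ys.length - m := by
          simp
        rw [hidx]
        rw [List.eraseIdx_append_of_lt_length (by omega)]

theorem pvPopPhase_closed (n : Nat) :
    ∀ (arr temp : List Int), n ≤ arr.length →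
      pvPopPhase arr temp n =
        (arr.take (arr.length - n), temp ++ (arr.drop (arr.length - n)).reverse) := by
  induction n with
  | zero => intro arr temp _; simp [pvPopPhase]
  | succ m ih =>
    intro arr temp hlen
    rcases List.eq_nil_or_concat arr with rfl | ⟨ys, x, rfl⟩
    · simp at hlen
    · simp only [List.concat_eq_append] at hlen ⊢
      have hm : m ≤ ys.length := by simp at hlen; omega
      rw [pvPopPhase, PySem.List.pop?_last]
      show pvPopPhase ys (temp ++ [x]) m = _
      rw [ih ys (temp ++ [x]) hm]
      have hidx : (ys ++ [x]).length - (m + 1) = ys.length - m := by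
        simp
      rw [hidx]
      refine Prod.ext ?_ ?_
      · show ys.take (ys.length - m) = (ys ++ [x]).take (ys.length - m)
        rw [List.take_append_of_le_length (by omega)]
      · show temp ++ [x] ++ (ys.drop (ys.length - m)).reverse =
          temp ++ ((ys ++ [x]).drop (ys.length - m)).reverse
        rw [List.drop_append_of_le_length (by omega)]
        simp

theorem pvPushPhase_closed (temp : List Int) :
    ∀ (arr : List Int), pvPushPhase arr temp = arr ++ temp.reverse := by
  induction temp using List.reverseRecOn with
  | nil =>
    intro arr
    rw [pvPushPhase]
    show arr = arr ++ ([] : List Int).reverse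
    simp
  | append_singleton ys x ih =>
    intro arr
    rw [pvPushPhase, PySem.List.pop?_last]
    show pvPushPhase (arr ++ [x]) ys = arr ++ (ys ++ [x]).reverse
    rw [ih (arr ++ [x])]
    simp

-- ===== VERDICT (by name: the statement is the Claim_ definition above) =====
theorem utilMiddle_spec : Claim_equal_utilMiddle := by
  intro arr k _ ⟨hk1, hk2⟩
  unfold Spec_utilMiddle utilMiddle_alt
  set n := k.toNat with hn
  have hkn : k = (n : Int) := by omega
  have hn1 : 0 < n := by omega
  have hnlen : n ≤ arr.length := by omega
  rw [hkn]
  have hk1n : ((n : Int) - 1).toNat = n - 1 := by omega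
  rw [utilMiddle_closed n arr hn1 hnlen, hk1n,
      pvPopPhase_closed (n - 1) arr [] (by omega)]
  have hidx : arr.length - (n - 1) = (arr.length - n) + 1 := by omega
  simp only [hidx]
  rw [List.take_succ]
  have hlt : arr.length - n < arr.length := by omega
  have hget : arr[arr.length - n]?.toList = [arr[arr.length - n]'hlt] := by
    simp [List.getElem?_eq_getElem hlt]
  rw [hget, PySem.List.pop?_last]
  show _ = pvPushPhase (List.take (arr.length - n) arr)
      ([] ++ (List.drop (arr.length - n + 1) arr).reverse)
  rw [pvPushPhase_closed]
  simp [List.eraseIdx_eq_take_drop_succ]
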